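-- pv_equiv track=rewrite | github.com/vidagy/aoc | aoc/year_2024/task_15.py | transform
-- ===== SOURCE A (Python) =====
-- def transform(map: list[str]) -> list[str]:
--     res: list[str] = []
--     for line in map:
--         tmp = line.replace("#", "##")
--         tmp = tmp.replace("O", "[]")
--         tmp = tmp.replace(".", "..")
--         tmp = tmp.replace("@", "@.")
--         res.append(tmp)
--     return res
-- ===== SOURCE B (Python) =====
-- def transform(map: list[str]) -> list[str]:
--     m = {"#": "##", "O": "[]", ".": "..", "@": "@."}
--     return ["".join(m.get(c, c) for c in line) for line in map]
-- ===== Notes on version B (the rewrite author's own statement) =====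
-- stated objective: idiomatic
-- what changed: Replaces the four sequential whole-string replace passes with a single character-by-character pass per line using one mapping dict and ''.join.
import Mathlib
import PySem

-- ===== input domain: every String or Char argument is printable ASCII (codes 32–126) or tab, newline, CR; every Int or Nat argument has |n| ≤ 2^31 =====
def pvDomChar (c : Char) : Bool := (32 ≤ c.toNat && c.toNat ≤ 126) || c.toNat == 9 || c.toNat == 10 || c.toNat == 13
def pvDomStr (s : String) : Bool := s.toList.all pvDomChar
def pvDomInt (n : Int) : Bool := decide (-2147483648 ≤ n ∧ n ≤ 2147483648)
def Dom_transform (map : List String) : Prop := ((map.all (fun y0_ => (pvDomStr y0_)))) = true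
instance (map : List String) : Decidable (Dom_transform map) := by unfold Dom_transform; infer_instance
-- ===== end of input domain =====

-- B replaces A's four sequential whole-string replace passes with one mapping dict and a
-- single per-character pass joined per line (idiomatic; same asymptotic cost).

-- ===== PORT A =====
-- literal transliteration of A: fold over the lines, four sequential replaces per line
def transform (map : List String) : List String :=
  map.foldl (fun res line =>
    let tmp := PySem.Str.replace line "#" "##"
    let tmp := PySem.Str.replace tmp "O" "[]"
    let tmp := PySem.Str.replace tmp "." ".."
    let tmp := PySem.Str.replace tmp "@" "@."
    res ++ [tmp]) []

-- ===== PORT B =====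
-- B's mapping dict m
def pvMapB : PySem.Dict Char String :=
  PySem.Dict.ofList [('#', "##"), ('O', "[]"), ('.', ".."), ('@', "@.")]

-- ''.join(m.get(c, c) for c in line), per line of the list comprehension
def transform_alt (map : List String) : List String :=
  map.map (fun line =>
    PySem.Str.join "" (line.toList.map (fun c => PySem.Dict.getD pvMapB c (String.ofList [c]))))

-- ===== PRECONDITION & SPEC =====
def Spec_transform (map : List String) (out : List String) : Prop := out = transform_alt map
instance (map : List String) (out : List String) : Decidable (Spec_transform map out) := by unfold Spec_transform; infer_instance

-- ===== CLAIM (what is proved, stated in full; the proofs are below) =====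
def Claim_equal_transform : Prop := ∀ (map : List String), Dom_transform map → Spec_transform map (transform map)

-- ===== LEMMAS AND PROOFS =====

-- single-char replace is a flatMap over the characters
theorem pv_replace_go_single (a : Char) (new : List Char) :
    ∀ (l : List Char) (fuel : Nat) (acc : List Char), l.length ≤ fuel →
      PySem.Chars.replace.go [a] new fuel l acc
        = acc.reverse ++ l.flatMap (fun c => if c = a then new else [c]) := by
  intro l
  induction l with
  | nil =>
    intro fuel acc _
    cases fuel <;> simp [PySem.Chars.replace.go]
  | cons c t ih =>
    intro fuel acc hle
    cases fuel with
    | zero => simp at hle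
    | succ f =>
      simp only [List.length_cons] at hle
      by_cases h : c = a
      · subst h
        simp only [PySem.Chars.replace.go, List.isPrefixOf, BEq.refl, Bool.true_and,
          if_true, List.length_singleton, List.drop_succ_cons, List.drop_zero]
        rw [ih f (new.reverse ++ acc) (by omega)]
        simp
      · have hpre : ([a].isPrefixOf (c :: t)) = false := by
          simp [List.isPrefixOf]
          intro hb; exact absurd hb.symm h
        simp only [PySem.Chars.replace.go, hpre, Bool.false_eq_true, if_false]
        rw [ih f (c :: acc) (by omega)]
        simp [h]

theorem pv_replace_single (s : List Char) (a : Char) (new : List Char) :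
    PySem.Chars.replace s [a] new = s.flatMap (fun c => if c = a then new else [c]) := by
  unfold PySem.Chars.replace
  simp only [List.isEmpty_cons, if_false, Bool.false_eq_true]
  exact pv_replace_go_single a new s s.length [] (le_refl _)

-- the composed per-character expansion of A's four passes
theorem pv_char_chain (c : Char) :
    (List.flatMap
        (fun x =>
          List.flatMap
            (fun x =>
              List.flatMap (fun c => if c = '@' then "@.".toList else [c])
                (if x = '.' then "..".toList else [x]))
            (if x = 'O' then "[]".toList else [x]))
        (if c = '#' then "##".toList else [c]))
      = (String.toList ∘ fun c => PySem.Dict.getD pvMapB c (String.ofList [c])) c := by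
  simp only [Function.comp]
  by_cases h1 : c = '#'; · subst h1; decide
  by_cases h2 : c = 'O'; · subst h2; decide
  by_cases h3 : c = '.'; · subst h3; decide
  by_cases h4 : c = '@'; · subst h4; decide
  have g1 : (('#' : Char) == c) = false := by simp [Ne.symm h1]
  have g2 : ('O' == c) = false := by simp [Ne.symm h2]
  have g3 : (('.' : Char) == c) = false := by simp [Ne.symm h3]
  have g4 : ('@' == c) = false := by simp [Ne.symm h4]
  have hm : pvMapB.items = [('#', "##"), ('O', "[]"), ('.', ".."), ('@', "@.")] := by rfl
  simp [h1, h2, h3, h4, PySem.Dict.getD, PySem.Dict.get?, hm, List.find?, g1, g2, g3, g4]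

theorem pv_join_nil (parts : List (List Char)) :
    PySem.Chars.join [] parts = parts.flatten := by
  unfold PySem.Chars.join List.intercalate
  induction parts with
  | nil => rfl
  | cons p ps ih =>
    cases ps with
    | nil => simp
    | cons q qs => simpa using ih

-- per-line agreement of the two programs
theorem pv_line (line : String) :
    (PySem.Str.replace (PySem.Str.replace (PySem.Str.replace
        (PySem.Str.replace line "#" "##") "O" "[]") "." "..") "@" "@.")
      = PySem.Str.join "" (line.toList.map (fun c => PySem.Dict.getD pvMapB c (String.ofList [c]))) := by
  rw [← String.toList_inj]
  rw [PySem.Str.toList_join]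
  simp only [PySem.Str.toList_replace]
  have h : ("" : String).toList = [] := rfl
  rw [h, pv_join_nil]
  have e1 : ("#" : String).toList = ['#'] := rfl
  have e2 : ("O" : String).toList = ['O'] := rfl
  have e3 : ("." : String).toList = ['.'] := rfl
  have e4 : ("@" : String).toList = ['@'] := rfl
  rw [e1, e2, e3, e4, pv_replace_single, pv_replace_single, pv_replace_single,
    pv_replace_single]
  rw [List.flatMap_assoc, List.flatMap_assoc, List.flatMap_assoc,
    List.map_map, ← List.flatMap_def]
  rw [funext pv_char_chain]

-- ===== VERDICT (by name: the statement is the Claim_ definition above) =====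
theorem pv_all (map : List String) : transform map = transform_alt map := by
  unfold transform transform_alt
  induction map using List.reverseRecOn with
  | nil => rfl
  | append_singleton xs x ih =>
    rw [List.foldl_append, List.map_append, ← ih]
    simp [pv_line x]

theorem transform_spec : Claim_equal_transform := by
  intro map _
  exact pv_all map
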